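-- pv_equiv track=rewrite | github.com/queelius/computational-explorations | src/coprime_spectral.py | coprime_adjacency_dict
-- ===== SOURCE A (Python) =====
-- import math
-- from typing import List, Tuple, Dict, Set, Optional, Any
--
-- def coprime_adjacency_dict(n: int) -> Dict[int, Set[int]]:
--     """
--     Build adjacency dict for coprime graph G(n). Vertices are 1..n.
--     """
--     adj: Dict[int, Set[int]] = {v: set() for v in range(1, n + 1)}
--     for i in range(1, n + 1):
--         for j in range(i + 1, n + 1):
--             if math.gcd(i, j) == 1:
--                 adj[i].add(j)
--                 adj[j].add(i)
--     return adj
-- ===== SOURCE B (Python) =====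
-- def coprime_adjacency_dict(n):
--     """
--     Build adjacency dict for coprime graph G(n). Vertices are 1..n.
--     Per-vertex divisor sieve: mark multiples of each divisor d >= 2 of v;
--     the unmarked vertices (other than v) are exactly those coprime to v.
--     """
--     adj = {}
--     for v in range(1, n + 1):
--         bad = set()
--         for d in range(2, v + 1):
--             if v % d == 0:
--                 for m in range(d, n + 1, d):
--                     bad.add(m)
--         row = set()
--         for u in range(1, n + 1):
--             if u != v and u not in bad:
--                 row.add(u)
--         adj[v] = row
--     return adj
-- ===== Notes on version B (the rewrite author's own statement) =====
-- stated objective: alternative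
-- what changed: B builds each vertex's row with a per-vertex divisor sieve (mark multiples of every divisor d>=2 of v, take the unmarked vertices) instead of A's pairwise gcd test with symmetric set insertion.
import Mathlib
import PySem

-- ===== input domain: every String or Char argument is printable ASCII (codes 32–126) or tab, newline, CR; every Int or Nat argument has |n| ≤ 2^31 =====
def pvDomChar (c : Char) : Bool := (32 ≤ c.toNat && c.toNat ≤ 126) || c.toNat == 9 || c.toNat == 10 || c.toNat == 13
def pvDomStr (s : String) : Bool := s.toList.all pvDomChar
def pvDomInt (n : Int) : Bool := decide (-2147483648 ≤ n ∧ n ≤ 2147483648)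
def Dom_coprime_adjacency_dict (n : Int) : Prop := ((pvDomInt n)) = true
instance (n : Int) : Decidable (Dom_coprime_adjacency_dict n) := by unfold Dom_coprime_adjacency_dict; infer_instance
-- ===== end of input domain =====

-- B replaces A's pairwise gcd test with symmetric set insertion by a per-vertex divisor
-- sieve: mark the multiples of every divisor d ≥ 2 of v; the unmarked vertices ≠ v form v's row.

-- ===== PORT A =====
def coprime_adjacency_dict (n : Int) : List (Int × List Int) :=
  let adj0 : PySem.Dict Int (PySem.Set Int) :=
    (PySem.List.pyRange 1 (n+1) 1).foldl (fun d v => d.insert v PySem.Set.empty) PySem.Dict.empty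
  let adj :=
    (PySem.List.pyRange 1 (n+1) 1).foldl (fun d i =>
      (PySem.List.pyRange (i+1) (n+1) 1).foldl (fun d j =>
        if Int.gcd i j = 1 then
          (d.modify i PySem.Set.empty (fun s => PySem.Set.add s j)).modify j PySem.Set.empty
            (fun s => PySem.Set.add s i)
        else d) d) adj0
  adj.items

-- ===== PORT B =====
-- the local 'bad' set of Source B: multiples ≤ n of every divisor d ∈ [2, v] of v
def pvBadB (n v : Int) : PySem.Set Int :=
  (PySem.List.pyRange 2 (v+1) 1).foldl (fun s d =>
    if PySem.Int.mod v d = 0 then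
      (PySem.List.pyRange d (n+1) d).foldl (fun s m => PySem.Set.add s m) s
    else s) PySem.Set.empty

-- the local 'row' set of Source B: u ∈ [1, n], u ≠ v, u unmarked
def pvRowB (n v : Int) (bad : PySem.Set Int) : PySem.Set Int :=
  (PySem.List.pyRange 1 (n+1) 1).foldl (fun s u =>
    if u ≠ v ∧ ¬ (u ∈ bad) then PySem.Set.add s u else s) PySem.Set.empty

def coprime_adjacency_dict_alt (n : Int) : List (Int × List Int) :=
  ((PySem.List.pyRange 1 (n+1) 1).foldl
    (fun adj v => adj.insert v (pvRowB n v (pvBadB n v))) PySem.Dict.empty).items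

-- ===== PRECONDITION & SPEC =====
def Spec_coprime_adjacency_dict (n : Int) (out : List (Int × List Int)) : Prop := out = coprime_adjacency_dict_alt n
instance (n : Int) (out : List (Int × List Int)) : Decidable (Spec_coprime_adjacency_dict n out) := by unfold Spec_coprime_adjacency_dict; infer_instance

-- ===== CLAIM (what is proved, stated in full; the proofs are below) =====
def Claim_equal_coprime_adjacency_dict : Prop := ∀ (n : Int), Dom_coprime_adjacency_dict n → Spec_coprime_adjacency_dict n (coprime_adjacency_dict n)

-- ===== LEMMAS AND PROOFS =====

-- canonical row: vertices of 1..n other than v that are coprime to v, ascending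
def pvRow (n v : Int) : List Int :=
  (PySem.List.pyRange 1 (n+1) 1).filter (fun u => decide (u ≠ v ∧ Int.gcd u v = 1))

-- B side: membership in the fold of set-updates
lemma pv_mem_foldl_update (l : List Int) (g : Int → List Int) (s : PySem.Set Int) (y : Int) :
    y ∈ l.foldl (fun s d => PySem.Set.update s (g d)) s ↔ y ∈ s ∨ ∃ d ∈ l, y ∈ g d := by
  induction l generalizing s with
  | nil => simp
  | cons d t ih => simp [List.foldl_cons, ih, PySem.Set.mem_update]; tauto

lemma pv_mem_bad (n v u : Int) :
    u ∈ pvBadB n v ↔ ∃ d, 2 ≤ d ∧ d ≤ v ∧ d ∣ v ∧ u ∈ PySem.List.pyRange d (n+1) d := by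
  unfold pvBadB
  rw [PySem.List.foldl_ite_eq_foldl_filter (p := fun d => PySem.Int.mod v d = 0)
    (f := fun s d => (PySem.List.pyRange d (n+1) d).foldl (fun s m => PySem.Set.add s m) s)]
  rw [show (fun (s : PySem.Set Int) (d : Int) => (PySem.List.pyRange d (n+1) d).foldl (fun s m => PySem.Set.add s m) s)
      = fun s d => PySem.Set.update s (PySem.List.pyRange d (n+1) d) from rfl]
  rw [pv_mem_foldl_update]
  simp only [PySem.Set.empty, List.not_mem_nil, false_or, List.mem_filter,
    PySem.List.mem_pyRange_one, decide_eq_true_eq, PySem.Int.mod_eq_zero_iff_dvd]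
  constructor
  · rintro ⟨d, ⟨⟨h2, hlt⟩, hdvd⟩, hm⟩; exact ⟨d, h2, by omega, hdvd, hm⟩
  · rintro ⟨d, h2, hle, hdvd, hm⟩; exact ⟨d, ⟨⟨h2, by omega⟩, hdvd⟩, hm⟩

lemma pv_bad_iff (n v u : Int) (hu1 : 1 ≤ u) (hun : u ≤ n) (hv : 1 ≤ v) :
    u ∈ pvBadB n v ↔ Int.gcd u v ≠ 1 := by
  rw [pv_mem_bad]
  constructor
  · rintro ⟨d, h2, hle, hdvd, hm⟩
    rw [PySem.List.mem_pyRange_iff_of_pos (by omega)] at hm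
    obtain ⟨hdu, _, hdvdu⟩ := hm
    have hdu' : d ∣ u := by
      have := dvd_add hdvdu (dvd_refl d); simpa using this
    intro h1
    have hdg : d ∣ (Int.gcd u v : Int) := Int.dvd_coe_gcd hdu' hdvd
    rw [h1] at hdg
    have := Int.le_of_dvd (by norm_num) hdg
    omega
  · intro hg
    set g : Int := (Int.gcd u v : Int) with hgdef
    have hgu : g ∣ u := Int.gcd_dvd_left u v
    have hgv : g ∣ v := Int.gcd_dvd_right u v
    have hgpos : 0 < g := by
      have : Int.gcd u v ≠ 0 := by
        intro h; rw [Int.gcd_eq_zero_iff] at h; omega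
      positivity
    have hg2 : 2 ≤ g := by
      have : g ≠ 1 := by simpa [hgdef] using fun h => hg (by exact_mod_cast h)
      omega
    refine ⟨g, hg2, Int.le_of_dvd (by omega) hgv, hgv, ?_⟩
    rw [PySem.List.mem_pyRange_iff_of_pos (by omega)]
    exact ⟨Int.le_of_dvd (by omega) hgu, by omega, dvd_sub hgu dvd_rfl⟩

lemma pv_rowB_eq (n v : Int) (hv : 1 ≤ v) : pvRowB n v (pvBadB n v) = pvRow n v := by
  unfold pvRowB pvRow
  rw [PySem.List.foldl_ite_eq_foldl_filter (p := fun u => u ≠ v ∧ ¬ (u ∈ pvBadB n v))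
    (f := fun s u => PySem.Set.add s u)]
  rw [show (fun (s : PySem.Set Int) (u : Int) => s.add u) = @PySem.Set.add Int _ from rfl,
    show (PySem.Set.empty : PySem.Set Int) = [] from rfl, ← PySem.Set.ofList_eq_foldl]
  rw [PySem.Set.ofList_eq_self_of_nodup _ ((PySem.List.nodup_pyRange_one 1 (n+1)).filter _)]
  apply List.filter_congr
  intro u hu
  rw [PySem.List.mem_pyRange_one] at hu
  have := pv_bad_iff n v u (by omega) (by omega) hv
  by_cases hmem : u ∈ pvBadB n v <;> by_cases huv : u = v <;> simp [hmem, huv] at this ⊢ <;> tauto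

theorem pv_b_eq (n : Int) : coprime_adjacency_dict_alt n =
    (PySem.List.pyRange 1 (n+1) 1).map (fun v => (v, pvRow n v)) := by
  unfold coprime_adjacency_dict_alt
  rw [PySem.Dict.items_foldl_insert_fresh (PySem.List.pyRange 1 (n+1) 1) (fun v => v)
      (fun v => pvRowB n v (pvBadB n v)) PySem.Dict.empty
      (by intro a _; simp [PySem.Dict.contains_empty])
      (by simpa using PySem.List.nodup_pyRange_one 1 (n+1))]
  simp only [PySem.Dict.empty, List.nil_append]
  apply List.map_congr_left
  intro v hv
  rw [PySem.List.mem_pyRange_one] at hv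
  rw [pv_rowB_eq n v (by omega)]

-- ========== A SIDE ==========

-- A side: loop invariants for the nested gcd loop
def pvPart (v m : Int) : List Int :=
  (PySem.List.pyRange 1 m 1).filter (fun u => decide (Int.gcd u v = 1))

def pvD0 (n : Int) : PySem.Dict Int (PySem.Set Int) :=
  (PySem.List.pyRange 1 (n+1) 1).foldl (fun d v => d.insert v PySem.Set.empty) PySem.Dict.empty

def pvInnerF (i : Int) (d : PySem.Dict Int (PySem.Set Int)) (j : Int) : PySem.Dict Int (PySem.Set Int) :=
  if Int.gcd i j = 1 then
    (d.modify i PySem.Set.empty (fun s => PySem.Set.add s j)).modify j PySem.Set.empty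
      (fun s => PySem.Set.add s i)
  else d

def pvStepA (n : Int) (d : PySem.Dict Int (PySem.Set Int)) (i : Int) : PySem.Dict Int (PySem.Set Int) :=
  (PySem.List.pyRange (i+1) (n+1) 1).foldl (pvInnerF i) d

lemma pv_a_unfold (n : Int) :
    coprime_adjacency_dict n = ((PySem.List.pyRange 1 (n+1) 1).foldl (pvStepA n) (pvD0 n)).items := rfl

def pvInv (n m : Int) (d : PySem.Dict Int (PySem.Set Int)) : Prop :=
  d.keys = PySem.List.pyRange 1 (n+1) 1 ∧
  ∀ v, 1 ≤ v → v ≤ n → d.getD v PySem.Set.empty = (if v < m then pvRow n v else pvPart v m)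

def pvInnerInv (n m t : Int) (d : PySem.Dict Int (PySem.Set Int)) : Prop :=
  d.keys = PySem.List.pyRange 1 (n+1) 1 ∧
  ∀ v, 1 ≤ v → v ≤ n → d.getD v PySem.Set.empty =
    (if v < m then pvRow n v
     else if v = m then pvPart m m ++ (PySem.List.pyRange (m+1) t 1).filter (fun u => decide (Int.gcd m u = 1))
     else if v < t then pvPart v (m+1)
     else pvPart v m)

lemma pv_D0_keys (n : Int) : (pvD0 n).keys = PySem.List.pyRange 1 (n+1) 1 := by
  unfold pvD0
  rw [PySem.Dict.keys_foldl_insert (PySem.List.pyRange 1 (n+1) 1) (fun _ _ => PySem.Set.empty) PySem.Dict.empty]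
  rw [show (PySem.Dict.empty : PySem.Dict Int (PySem.Set Int)).keys = [] from rfl]
  rw [PySem.Set.update_nil_left, PySem.Set.ofList_eq_self_of_nodup _ (PySem.List.nodup_pyRange_one 1 (n+1))]

lemma pv_base (n : Int) : pvInv n 1 (pvD0 n) := by
  refine ⟨pv_D0_keys n, ?_⟩
  intro v hv1 hvn
  have hitems : (pvD0 n).items = (PySem.List.pyRange 1 (n+1) 1).map (fun v => (v, PySem.Set.empty)) := by
    unfold pvD0
    rw [PySem.Dict.items_foldl_insert_fresh (PySem.List.pyRange 1 (n+1) 1) (fun v => v)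
        (fun _ => PySem.Set.empty) PySem.Dict.empty
        (by intro a _; simp [PySem.Dict.contains_empty])
        (by simpa using PySem.List.nodup_pyRange_one 1 (n+1))]
    rfl
  have hmem : (v, (PySem.Set.empty : PySem.Set Int)) ∈ (pvD0 n).items := by
    rw [hitems]
    exact List.mem_map.mpr ⟨v, PySem.List.mem_pyRange_one.mpr ⟨by omega, by omega⟩, rfl⟩
  rw [PySem.Dict.getD_of_mem_items _ hmem (by rw [pv_D0_keys]; exact PySem.List.nodup_pyRange_one 1 (n+1)) _]
  rw [if_neg (by omega)]
  unfold pvPart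
  rw [PySem.List.pyRange_one_eq_nil le_rfl]
  rfl

lemma pv_inner_start (n m : Int) (d : PySem.Dict Int (PySem.Set Int))
    (hd : pvInv n m d) : pvInnerInv n m (m+1) d := by
  obtain ⟨hk, hval⟩ := hd
  refine ⟨hk, ?_⟩
  intro v hv1 hvn
  rw [hval v hv1 hvn, PySem.List.pyRange_one_eq_nil le_rfl]
  by_cases h1 : v < m
  · simp [h1]
  · rw [if_neg h1, if_neg h1]
    by_cases h2 : v = m
    · simp [h2]
    · rw [if_neg h2, if_neg (by omega : ¬ v < m + 1)]

lemma pv_inner_step (n m j : Int) (hm1 : 1 ≤ m) (hmn : m ≤ n) (hj1 : m + 1 ≤ j) (hjn : j ≤ n)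
    (d : PySem.Dict Int (PySem.Set Int)) (hd : pvInnerInv n m j d) :
    pvInnerInv n m (j+1) (pvInnerF m d j) := by
  obtain ⟨hk, hval⟩ := hd
  unfold pvInnerF
  by_cases hg : Int.gcd m j = 1
  · rw [if_pos hg]
    constructor
    · rw [PySem.Dict.keys_modify, PySem.Dict.keys_insert_of_contains _ _ (by
        rw [PySem.Dict.contains_iff_mem_keys]
        rw [PySem.Dict.keys_modify, PySem.Dict.keys_insert_of_contains _ _ (by
          rw [PySem.Dict.contains_iff_mem_keys, hk, PySem.List.mem_pyRange_one]; omega), hk,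
          PySem.List.mem_pyRange_one]
        omega)]
      rw [PySem.Dict.keys_modify, PySem.Dict.keys_insert_of_contains _ _ (by
        rw [PySem.Dict.contains_iff_mem_keys, hk, PySem.List.mem_pyRange_one]; omega), hk]
    · intro v hv1 hvn
      rw [PySem.Dict.getD_modify, PySem.Dict.getD_modify, PySem.Dict.getD_modify]
      by_cases hvj : v = j
      · rw [if_pos hvj, if_neg (by omega : ¬ j = m)]
        rw [hval j (by omega) (by omega), if_neg (by omega), if_neg (by omega), if_neg (by omega)]
        rw [PySem.Set.add_of_not_mem (by
          intro hmem
          have := (List.mem_filter.mp (by exact hmem)).1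
          rw [PySem.List.mem_pyRange_one] at this
          omega)]
        rw [if_neg (by omega : ¬ v < m), if_neg (by omega : ¬ v = m), if_pos (by omega : v < j + 1)]
        unfold pvPart
        rw [PySem.List.pyRange_one_succ_right (by omega : (1:Int) ≤ m), List.filter_append, hvj]
        simp [hg]
      · rw [if_neg hvj]
        by_cases hvm : v = m
        · rw [if_pos hvm]
          rw [hval m (by omega) (by omega), if_neg (by omega), if_pos rfl]
          rw [PySem.Set.add_of_not_mem (by
            intro hmem
            rcases List.mem_append.mp hmem with h | h
            · have := (List.mem_filter.mp h).1
              rw [PySem.List.mem_pyRange_one] at this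
              omega
            · have := (List.mem_filter.mp h).1
              rw [PySem.List.mem_pyRange_one] at this
              omega)]
          rw [hvm, if_neg (by omega : ¬ m < m), if_pos rfl]
          rw [PySem.List.pyRange_one_succ_right (by omega : m + 1 ≤ j), List.filter_append]
          simp [hg]
        · rw [if_neg hvm, hval v hv1 hvn]
          by_cases h1 : v < m
          · simp [h1]
          · rw [if_neg h1, if_neg h1, if_neg hvm, if_neg hvm]
            by_cases h2 : v < j
            · rw [if_pos h2, if_pos (by omega)]
            · rw [if_neg h2, if_neg (by omega : ¬ v < j + 1)]
  · rw [if_neg hg]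
    refine ⟨hk, ?_⟩
    intro v hv1 hvn
    rw [hval v hv1 hvn]
    by_cases h1 : v < m
    · simp [h1]
    · rw [if_neg h1, if_neg h1]
      by_cases h2 : v = m
      · rw [if_pos h2, if_pos h2]
        rw [PySem.List.pyRange_one_succ_right (by omega : m + 1 ≤ j), List.filter_append]
        simp [hg]
      · rw [if_neg h2, if_neg h2]
        by_cases h3 : v < j
        · rw [if_pos h3, if_pos (by omega)]
        · rw [if_neg h3]
          by_cases h4 : v = j
          · rw [if_pos (by omega : v < j + 1), h4]
            unfold pvPart
            rw [PySem.List.pyRange_one_succ_right (by omega : (1:Int) ≤ m), List.filter_append]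
            simp [hg]
          · rw [if_neg (by omega : ¬ v < j + 1)]

lemma pv_inner_end (n m : Int) (hm1 : 1 ≤ m) (hmn : m ≤ n) (d : PySem.Dict Int (PySem.Set Int))
    (hd : pvInnerInv n m (n+1) d) : pvInv n (m+1) d := by
  obtain ⟨hk, hval⟩ := hd
  refine ⟨hk, ?_⟩
  intro v hv1 hvn
  rw [hval v hv1 hvn]
  by_cases h1 : v < m
  · rw [if_pos h1, if_pos (by omega)]
  · rw [if_neg h1]
    by_cases h2 : v = m
    · rw [if_pos h2, if_pos (by omega), h2]
      unfold pvRow pvPart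
      rw [PySem.List.pyRange_one_append 1 (m+1) (n+1) (by omega) (by omega), List.filter_append,
        PySem.List.pyRange_one_succ_right (by omega : (1:Int) ≤ m), List.filter_append]
      have e1 : (PySem.List.pyRange 1 m 1).filter (fun u => decide (u ≠ m ∧ Int.gcd u m = 1))
          = (PySem.List.pyRange 1 m 1).filter (fun u => decide (Int.gcd u m = 1)) := by
        apply List.filter_congr
        intro u hu
        rw [PySem.List.mem_pyRange_one] at hu
        have : u ≠ m := by omega
        simp [this]
      have e2 : ([m] : List Int).filter (fun u => decide (u ≠ m ∧ Int.gcd u m = 1)) = [] := by simp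
      have e3 : (PySem.List.pyRange (m+1) (n+1) 1).filter (fun u => decide (u ≠ m ∧ Int.gcd u m = 1))
          = (PySem.List.pyRange (m+1) (n+1) 1).filter (fun u => decide (Int.gcd m u = 1)) := by
        apply List.filter_congr
        intro u hu
        rw [PySem.List.mem_pyRange_one] at hu
        have h4 : u ≠ m := by omega
        simp [h4, Int.gcd_comm]
      rw [e1, e2, e3]
      simp
    · rw [if_neg h2, if_pos (by omega : v < n + 1), if_neg (by omega : ¬ v < m + 1)]

lemma pv_inner_loop (n m : Int) (hm1 : 1 ≤ m) (hmn : m ≤ n) (d : PySem.Dict Int (PySem.Set Int))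
    (hd : pvInv n m d) : ∀ s : Nat, m + 1 + s ≤ n + 1 →
      pvInnerInv n m (m+1+s) ((PySem.List.pyRange (m+1) (m+1+s) 1).foldl (pvInnerF m) d) := by
  intro s
  induction s with
  | zero =>
    intro _
    simpa [PySem.List.pyRange_one_eq_nil (by omega : m+1 ≤ m+1+(0:Nat))] using
      pv_inner_start n m d hd
  | succ s ih =>
    intro hle
    have h1 : m + 1 + (s:Int) ≤ n + 1 := by push_cast at hle ⊢; omega
    have hsplit : PySem.List.pyRange (m+1) (m+1+(s+1:Nat)) 1
        = PySem.List.pyRange (m+1) (m+1+(s:Nat)) 1 ++ [m+1+(s:Nat)] := by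
      have := PySem.List.pyRange_one_succ_right (a := m+1) (b := m+1+(s:Nat)) (by omega)
      rw [show (m+1+(s+1:Nat) : Int) = (m+1+(s:Nat)) + 1 by push_cast; ring]
      exact this
    rw [hsplit, List.foldl_append]
    have := pv_inner_step n m (m+1+(s:Nat)) hm1 hmn (by omega) (by push_cast at hle; omega)
      _ (ih h1)
    rw [show (m+1+(s+1:Nat) : Int) = (m+1+(s:Nat)) + 1 by push_cast; ring]
    simpa using this

lemma pv_outer_step (n m : Int) (hm1 : 1 ≤ m) (hmn : m ≤ n) (d : PySem.Dict Int (PySem.Set Int))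
    (hd : pvInv n m d) : pvInv n (m+1) (pvStepA n d m) := by
  have hs : m + 1 + ((n - m).toNat : Int) = n + 1 := by omega
  have := pv_inner_loop n m hm1 hmn d hd (n - m).toNat (by omega)
  rw [hs] at this
  exact pv_inner_end n m hm1 hmn _ (by unfold pvStepA; exact this)

lemma pv_outer_loop (n : Int) : ∀ t : Nat, 1 + (t:Int) ≤ n + 1 →
    pvInv n (1+t) ((PySem.List.pyRange 1 (1+t) 1).foldl (pvStepA n) (pvD0 n)) := by
  intro t
  induction t with
  | zero => intro _; simpa [PySem.List.pyRange_one_eq_nil (by omega : (1:Int) ≤ 1+(0:Nat))] using pv_base n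
  | succ t ih =>
    intro hle
    have hsplit : PySem.List.pyRange 1 (1+(t+1:Nat)) 1 = PySem.List.pyRange 1 (1+(t:Nat)) 1 ++ [((1:Int)+(t:Nat))] := by
      have := PySem.List.pyRange_one_succ_right (a := 1) (b := 1+(t:Nat)) (by omega)
      rw [show (1+(t+1:Nat) : Int) = (1+(t:Nat)) + 1 by push_cast; ring]
      exact this
    rw [hsplit, List.foldl_append]
    have := pv_outer_step n (1+(t:Nat)) (by omega) (by push_cast at hle; omega) _
      (ih (by push_cast at hle ⊢; omega))
    rw [show (1+(t+1:Nat) : Int) = (1+(t:Nat)) + 1 by push_cast; ring]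
    simpa using this

theorem pv_a_eq (n : Int) : coprime_adjacency_dict n =
    (PySem.List.pyRange 1 (n+1) 1).map (fun v => (v, pvRow n v)) := by
  rw [pv_a_unfold]
  by_cases hn : n ≤ 0
  · rw [PySem.List.pyRange_one_eq_nil (by omega)]
    simp [pvD0, PySem.List.pyRange_one_eq_nil (by omega : n + 1 ≤ 1), PySem.Dict.empty]
  · push Not at hn
    obtain ⟨hkeys, hval⟩ := pv_outer_loop n n.toNat (by omega)
    rw [show (1 + (n.toNat:Int)) = n + 1 by omega] at hkeys hval
    rw [PySem.Dict.items_eq_map_keys _ (by rw [hkeys]; exact PySem.List.nodup_pyRange_one 1 (n+1)) PySem.Set.empty]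
    rw [hkeys]
    apply List.map_congr_left
    intro v hv
    rw [PySem.List.mem_pyRange_one] at hv
    rw [hval v (by omega) (by omega), if_pos (by omega)]

-- ===== VERDICT (by name: the statement is the Claim_ definition above) =====
theorem coprime_adjacency_dict_spec : Claim_equal_coprime_adjacency_dict := by
  intro n _
  unfold Spec_coprime_adjacency_dict
  rw [pv_a_eq, pv_b_eq]
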